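-- pv_equiv track=rewrite | github.com/zachwaugh/adventofcode | 2024/day9.py | is_compacted
-- ===== SOURCE A (Python) =====
-- def is_compacted(array):
--     has_seen_empty_space = False
--     for element in array:
--         if element == ".":
--             has_seen_empty_space = True
--         elif has_seen_empty_space:
--             # if we see any non-empty space
--             # once we've seen an empty space
--             # we're not compacted
--             return False
--     return True
-- ===== SOURCE B (Python) =====
-- def is_compacted(array):
--     gaps = array.count(".")
--     return all(e == "." for e in array[len(array) - gaps:])
-- ===== Notes on version B (the rewrite author's own statement) =====
-- stated objective: alternative
-- what changed: Replaces A's single stateful scan with a has_seen_empty_space flag and early return by a counting argument: count the gaps, then check that the trailing slice of exactly that length is all gaps (compacted iff all '.' sit at the end).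
import Mathlib
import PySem

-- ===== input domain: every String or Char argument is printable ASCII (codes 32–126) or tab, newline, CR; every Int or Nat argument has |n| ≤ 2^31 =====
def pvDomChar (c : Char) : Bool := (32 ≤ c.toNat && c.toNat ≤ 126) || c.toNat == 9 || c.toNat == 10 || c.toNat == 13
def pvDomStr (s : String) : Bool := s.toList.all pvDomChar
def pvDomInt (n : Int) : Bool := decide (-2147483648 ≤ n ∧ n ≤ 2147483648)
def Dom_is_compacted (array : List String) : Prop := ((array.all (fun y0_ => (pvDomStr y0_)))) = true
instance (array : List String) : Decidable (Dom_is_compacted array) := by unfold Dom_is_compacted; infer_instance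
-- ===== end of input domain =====

-- B replaces A's stateful flag-scan by a counting argument: count the gaps, then
-- check that the trailing slice of exactly that length is all gaps. Objective: alternative.

-- ===== PORT A =====
-- the for-loop over `array` threading has_seen_empty_space, with its early return False
def isCompactedLoop : List String → Bool → Bool
  | [], _ => true
  | element :: rest, seen =>
      if element == "." then isCompactedLoop rest true
      else if seen then false
      else isCompactedLoop rest seen

def is_compacted (array : List String) : Bool := isCompactedLoop array false

-- ===== PORT B =====
def is_compacted_alt (array : List String) : Bool :=
  let gaps := PySem.List.count array "."
  (PySem.List.slice array (some ((array.length : Int) - (gaps : Int))) none).all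
    (fun e => e == ".")

-- ===== PRECONDITION & SPEC =====
def Spec_is_compacted (array : List String) (out : Bool) : Prop := out = is_compacted_alt array
instance (array : List String) (out : Bool) : Decidable (Spec_is_compacted array out) := by unfold Spec_is_compacted; infer_instance

-- ===== CLAIM (what is proved, stated in full; the proofs are below) =====
def Claim_equal_is_compacted : Prop := ∀ (array : List String), Dom_is_compacted array → Spec_is_compacted array (is_compacted array)

-- ===== LEMMAS AND PROOFS =====
theorem alt_eq_drop (xs : List String) :
    is_compacted_alt xs = (xs.drop (xs.length - xs.count ".")).all (fun e => e == ".") := by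
  show (PySem.List.slice xs (some ((xs.length : Int) - ((PySem.List.count xs "." : Int)))) none).all
      (fun e => e == ".") = _
  rw [PySem.List.count_eq]
  have hc : xs.count "." ≤ xs.length := List.count_le_length
  rw [show ((xs.length : Int) - (xs.count "." : Int)) = ((xs.length - xs.count "." : Nat) : Int) by omega]
  rw [PySem.List.slice_from_natCast]

theorem loop_true_eq_all (xs : List String) :
    isCompactedLoop xs true = xs.all (fun e => e == ".") := by
  induction xs with
  | nil => rfl
  | cons x rest ih =>
    by_cases hx : x = "."
    · simp [isCompactedLoop, hx, ih]
    · simp [isCompactedLoop, hx]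

-- a suffix of length (count + 1) cannot be all dots
theorem suffix_not_all_dots (xs : List String) (k : Nat)
    (hk : xs.length - k = xs.count "." + 1) :
    ((xs.drop k).all (fun e => e == ".")) = false := by
  by_contra h
  have hall : ∀ b ∈ xs.drop k, b = "." := by
    intro b hb
    have := List.all_eq_true.mp (Bool.ne_false_iff.mp h) b hb
    simpa using this
  have hcnt : (xs.drop k).count "." = (xs.drop k).length :=
    List.count_eq_length.mpr (fun b hb => (hall b hb).symm)
  have hle : (xs.drop k).count "." ≤ xs.count "." := by
    conv_rhs => rw [← List.take_append_drop k xs, List.count_append]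
    omega
  rw [hcnt, List.length_drop] at hle
  omega

theorem loop_false_eq_alt (xs : List String) :
    isCompactedLoop xs false = is_compacted_alt xs := by
  rw [alt_eq_drop]
  induction xs with
  | nil => rfl
  | cons x rest ih =>
    by_cases hx : x = "."
    · subst hx
      have hc : rest.count "." ≤ rest.length := List.count_le_length
      simp only [isCompactedLoop, beq_self_eq_true, if_true, loop_true_eq_all]
      rw [List.count_cons_self, List.length_cons]
      by_cases hz : rest.length - rest.count "." = 0
      · rw [show rest.length + 1 - (rest.count "." + 1) = 0 by omega, List.drop_zero]
        have : rest.length = rest.count "." := by omega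
        simp only [List.all_cons, beq_self_eq_true, Bool.true_and]
      · -- rest is not all dots; both sides are false
        have hkpos : 0 < rest.length - rest.count "." := Nat.pos_of_ne_zero hz
        rw [show rest.length + 1 - (rest.count "." + 1)
            = (rest.length - rest.count "." - 1) + 1 by omega, List.drop_succ_cons]
        have hrhs : ((rest.drop (rest.length - rest.count "." - 1)).all
            (fun e => e == ".")) = false := by
          apply suffix_not_all_dots
          omega
        rw [hrhs]
        by_contra h
        have hall : ∀ b ∈ rest, b = "." := by
          intro b hb
          have := List.all_eq_true.mp (Bool.ne_false_iff.mp h) b hb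
          simpa using this
        have : rest.count "." = rest.length :=
          List.count_eq_length.mpr (fun b hb => (hall b hb).symm)
        omega
    · have hne : (x == ".") = false := by simp [hx]
      have hcx : (x :: rest).count "." = rest.count "." := by
        simp [List.count_cons, hne]
      have hc : rest.count "." ≤ rest.length := List.count_le_length
      simp only [isCompactedLoop, hne, if_false, Bool.false_eq_true, ih, hcx,
        List.length_cons]
      rw [show rest.length + 1 - rest.count "."
          = (rest.length - rest.count ".") + 1 by omega, List.drop_succ_cons]

-- ===== VERDICT (by name: the statement is the Claim_ definition above) =====
theorem is_compacted_spec : Claim_equal_is_compacted := by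
  intro array _
  unfold Spec_is_compacted is_compacted
  exact loop_false_eq_alt array
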